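-- pv_equiv track=rewrite | github.com/myrrkel/pyzik | src/limbo.py | key_to_string
-- ===== SOURCE A (Python) =====
-- def key_to_string(key):
--     skey = ""
--     for c in key:
--         if c.isdigit():
--             n = chr(97 + int(c))
--             skey = skey + n.upper()
--         else:
--             skey = skey + c
--
--     return skey
-- ===== SOURCE B (Python) =====
-- def key_to_string(key):
--     # ten staged passes: pass d rewrites every digit d to its uppercase letter
--     for d in range(10):
--         key = key.replace(chr(48 + d), chr(65 + d))
--     return key
-- ===== Notes on version B (the rewrite author's own statement) =====
-- stated objective: alternative
-- what changed: Replaces A's single per-character conditional string accumulation with ten staged whole-string replace passes, one per digit, each rewriting that digit to its uppercase letter (correct because replacements emit letters, never digits, so passes are independent).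
import Mathlib
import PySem

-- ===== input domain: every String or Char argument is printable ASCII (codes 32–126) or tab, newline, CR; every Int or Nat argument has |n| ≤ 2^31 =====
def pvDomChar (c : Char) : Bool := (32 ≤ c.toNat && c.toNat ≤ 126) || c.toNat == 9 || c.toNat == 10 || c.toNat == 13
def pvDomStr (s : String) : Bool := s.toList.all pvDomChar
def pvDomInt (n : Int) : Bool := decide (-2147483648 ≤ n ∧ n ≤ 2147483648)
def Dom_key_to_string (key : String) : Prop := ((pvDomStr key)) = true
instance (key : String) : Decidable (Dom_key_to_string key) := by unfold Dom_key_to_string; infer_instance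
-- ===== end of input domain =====

-- B replaces A's single per-character conditional accumulation with ten staged whole-string
-- replace passes (one per digit); alternative decomposition, same result.


-- ===== PORT A =====
-- int(c) on a single ASCII digit char (guarded by isdigit) is exactly c.toNat - 48,
-- and chr/.upper() is Char.ofNat / PySem.Chars.upperChar.
def key_to_string (key : String) : String :=
  key.toList.foldl
    (fun skey c =>
      if PySem.Chars.isdigit c then
        skey ++ String.ofList [PySem.Chars.upperChar (Char.ofNat (97 + (c.toNat - 48)))]
      else
        skey ++ String.ofList [c])
    ""

-- ===== PORT B =====
-- Source B: for d in range(10): key = key.replace(chr(48 + d), chr(65 + d))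
def key_to_string_alt (key : String) : String :=
  (PySem.List.pyRange 0 10 1).foldl
    (fun s d =>
      PySem.Str.replace s
        (String.ofList [Char.ofNat (48 + d.toNat)])
        (String.ofList [Char.ofNat (65 + d.toNat)]))
    key

-- ===== PRECONDITION & SPEC =====
def Spec_key_to_string (key : String) (out : String) : Prop := out = key_to_string_alt key
instance (key : String) (out : String) : Decidable (Spec_key_to_string key out) := by unfold Spec_key_to_string; infer_instance

-- ===== CLAIM (what is proved, stated in full; the proofs are below) =====
def Claim_equal_key_to_string : Prop := ∀ (key : String), Dom_key_to_string key → Spec_key_to_string key (key_to_string key)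

-- ===== LEMMAS AND PROOFS =====

-- single-char replacement as a map
def pvRepl (o n x : Char) : Char := if x = o then n else x

lemma pv_go_single (o n : Char) (l : List Char) : ∀ (fuel : Nat) (acc : List Char),
    l.length ≤ fuel →
    PySem.Chars.replace.go [o] [n] fuel l acc
      = acc.reverse ++ l.map (pvRepl o n) := by
  induction l with
  | nil =>
    intro fuel acc _
    cases fuel <;> simp [PySem.Chars.replace.go]
  | cons c t ih =>
    intro fuel acc h
    cases fuel with
    | zero => simp at h
    | succ f =>
      rw [PySem.Chars.replace.go]
      by_cases hc : c = o
      · subst hc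
        have hp : [c].isPrefixOf (c :: t) = true := by simp [List.isPrefixOf]
        rw [if_pos hp]
        rw [show List.drop [c].length (c :: t) = t from rfl]
        rw [ih f _ (by simpa using h)]
        simp [pvRepl]
      · have hp : [o].isPrefixOf (c :: t) = false := by
          simp [List.isPrefixOf]
          exact fun h' => (hc h'.symm).elim
        rw [if_neg (by simp [hp])]
        rw [ih f _ (by simpa using Nat.le_of_succ_le_succ h)]
        simp [pvRepl, hc]

lemma pv_replace_single (l : List Char) (o n : Char) :
    PySem.Chars.replace l [o] [n] = l.map (pvRepl o n) := by
  rw [PySem.Chars.replace]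
  simp only [List.isEmpty_cons, if_false, Bool.false_eq_true]
  exact pv_go_single o n l l.length [] le_rfl

-- B's ten passes, per character
def pvTrB (c : Char) : Char :=
  pvRepl (Char.ofNat (48 + (9:Int).toNat)) (Char.ofNat (65 + (9:Int).toNat))
  (pvRepl (Char.ofNat (48 + (8:Int).toNat)) (Char.ofNat (65 + (8:Int).toNat))
  (pvRepl (Char.ofNat (48 + (7:Int).toNat)) (Char.ofNat (65 + (7:Int).toNat))
  (pvRepl (Char.ofNat (48 + (6:Int).toNat)) (Char.ofNat (65 + (6:Int).toNat))
  (pvRepl (Char.ofNat (48 + (5:Int).toNat)) (Char.ofNat (65 + (5:Int).toNat))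
  (pvRepl (Char.ofNat (48 + (4:Int).toNat)) (Char.ofNat (65 + (4:Int).toNat))
  (pvRepl (Char.ofNat (48 + (3:Int).toNat)) (Char.ofNat (65 + (3:Int).toNat))
  (pvRepl (Char.ofNat (48 + (2:Int).toNat)) (Char.ofNat (65 + (2:Int).toNat))
  (pvRepl (Char.ofNat (48 + (1:Int).toNat)) (Char.ofNat (65 + (1:Int).toNat))
  (pvRepl (Char.ofNat (48 + (0:Int).toNat)) (Char.ofNat (65 + (0:Int).toNat)) c)))))))))

lemma pv_range_lit : PySem.List.pyRange 0 10 1 = [0,1,2,3,4,5,6,7,8,9] := by decide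

lemma pv_alt_toList (key : String) :
    (key_to_string_alt key).toList = key.toList.map pvTrB := by
  unfold key_to_string_alt
  rw [pv_range_lit]
  simp only [List.foldl]
  simp only [PySem.Str.toList_replace, String.toList_ofList, pv_replace_single, List.map_map]
  exact List.map_congr_left fun c _ => by simp only [Function.comp_apply, pvTrB]

-- A's per-character branch equals B's ten passes on one character
def pvFA (c : Char) : Char :=
  if PySem.Chars.isdigit c then PySem.Chars.upperChar (Char.ofNat (97 + (c.toNat - 48))) else c

lemma pv_char_eq (c : Char) : pvTrB c = pvFA c := by
  by_cases h : PySem.Chars.isdigit c = true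
  · have hb : (decide ('0' ≤ c) && decide (c ≤ '9')) = true := h
    rw [Bool.and_eq_true, decide_eq_true_eq, decide_eq_true_eq] at hb
    have h1 : 48 ≤ c.toNat := hb.1
    have h2 : c.toNat ≤ 57 := hb.2
    have hc : Char.ofNat c.toNat = c := Char.ofNat_toNat c
    rw [← hc]
    set n := c.toNat with hn
    clear_value n
    interval_cases n <;> decide
  · have hne : ∀ d : Nat, d ≤ 9 → c ≠ Char.ofNat (48 + d) := by
      intro d hd hcd
      apply h
      rw [hcd]
      interval_cases d <;> decide
    unfold pvFA
    rw [if_neg h]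
    unfold pvTrB
    rw [show pvRepl (Char.ofNat (48 + (0:Int).toNat)) (Char.ofNat (65 + (0:Int).toNat)) c = c
        from if_neg (hne 0 (by norm_num))]
    rw [show pvRepl (Char.ofNat (48 + (1:Int).toNat)) (Char.ofNat (65 + (1:Int).toNat)) c = c
        from if_neg (hne 1 (by norm_num))]
    rw [show pvRepl (Char.ofNat (48 + (2:Int).toNat)) (Char.ofNat (65 + (2:Int).toNat)) c = c
        from if_neg (hne 2 (by norm_num))]
    rw [show pvRepl (Char.ofNat (48 + (3:Int).toNat)) (Char.ofNat (65 + (3:Int).toNat)) c = c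
        from if_neg (hne 3 (by norm_num))]
    rw [show pvRepl (Char.ofNat (48 + (4:Int).toNat)) (Char.ofNat (65 + (4:Int).toNat)) c = c
        from if_neg (hne 4 (by norm_num))]
    rw [show pvRepl (Char.ofNat (48 + (5:Int).toNat)) (Char.ofNat (65 + (5:Int).toNat)) c = c
        from if_neg (hne 5 (by norm_num))]
    rw [show pvRepl (Char.ofNat (48 + (6:Int).toNat)) (Char.ofNat (65 + (6:Int).toNat)) c = c
        from if_neg (hne 6 (by norm_num))]
    rw [show pvRepl (Char.ofNat (48 + (7:Int).toNat)) (Char.ofNat (65 + (7:Int).toNat)) c = c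
        from if_neg (hne 7 (by norm_num))]
    rw [show pvRepl (Char.ofNat (48 + (8:Int).toNat)) (Char.ofNat (65 + (8:Int).toNat)) c = c
        from if_neg (hne 8 (by norm_num))]
    exact if_neg (hne 9 (by norm_num))

-- A's fold appends exactly one mapped character per input character
lemma pv_a_foldl (l : List Char) (acc : String) :
    l.foldl
      (fun skey c =>
        if PySem.Chars.isdigit c then
          skey ++ String.ofList [PySem.Chars.upperChar (Char.ofNat (97 + (c.toNat - 48)))]
        else
          skey ++ String.ofList [c])
      acc
    = acc ++ String.ofList (l.map pvFA) := by
  induction l generalizing acc with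
  | nil => apply String.ext; simp
  | cons c t ih =>
    rw [List.foldl_cons, ih, List.map_cons]
    by_cases h : PySem.Chars.isdigit c = true
    · rw [if_pos h, show pvFA c = PySem.Chars.upperChar (Char.ofNat (97 + (c.toNat - 48)))
          from by unfold pvFA; rw [if_pos h]]
      apply String.ext; simp
    · rw [if_neg h, show pvFA c = c from by unfold pvFA; rw [if_neg h]]
      apply String.ext; simp

-- ===== VERDICT (by name: the statement is the Claim_ definition above) =====
theorem key_to_string_spec : Claim_equal_key_to_string := by
  intro key _
  unfold Spec_key_to_string key_to_string
  rw [pv_a_foldl]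
  apply String.ext
  rw [pv_alt_toList]
  simp only [String.toList_append, String.toList_ofList]
  rw [List.map_congr_left (fun c _ => pv_char_eq c)]
  simp
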